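-- pv_equiv track=rewrite | github.com/dmlguq456/TF_Restormer | tf_restormer/utils/metrics/asr.py | _postprocess_phonemes
-- ===== SOURCE A (Python) =====
-- from typing import Dict, List, Optional
--
-- _TIMIT39_MAP: Dict[str, str] = {
--     "ax": "ah", "ix": "ih", "ax-h": "ah", "axr": "er",
--     "em": "m",  "en": "n",  "eng": "ng", "el": "l",
--     "ux": "uw",
--     "dx": "dx",
-- }
--
-- _SILENCE_TOKENS = {"sil", "sp", "spn", "nsn", "pau"}
--
-- def _postprocess_phonemes(
--     toks: List[str],
--     phoneme_set: str = "arpabet",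
--     collapse_repeats: bool = False,
-- ) -> List[str]:
--     """Remove silence tokens, optionally collapse repeats, apply phoneme mapping."""
--     out: List[str] = []
--     prev: Optional[str] = None
--     for t in toks:
--         if t in _SILENCE_TOKENS or not t:
--             continue
--         if phoneme_set == "timit-39":
--             t = _TIMIT39_MAP.get(t, t)
--         if not t:
--             continue
--         if collapse_repeats and prev is not None and t == prev:
--             continue
--         out.append(t)
--         prev = t
--     return out
-- ===== SOURCE B (Python) =====
-- from itertools import groupby
-- from typing import Dict, List
--
-- _TIMIT39_MAP: Dict[str, str] = {
--     "ax": "ah", "ix": "ih", "ax-h": "ah", "axr": "er",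
--     "em": "m",  "en": "n",  "eng": "ng", "el": "l",
--     "ux": "uw",
--     "dx": "dx",
-- }
--
-- _SILENCE_TOKENS = {"sil", "sp", "spn", "nsn", "pau"}
--
-- def _postprocess_phonemes(
--     toks: List[str],
--     phoneme_set: str = "arpabet",
--     collapse_repeats: bool = False,
-- ) -> List[str]:
--     """Pipeline: filter silence/empties, map phonemes, collapse adjacent repeats."""
--     kept = [t for t in toks if t and t not in _SILENCE_TOKENS]
--     if phoneme_set == "timit-39":
--         kept = [_TIMIT39_MAP.get(t, t) for t in kept]
--     if collapse_repeats:
--         return [k for k, _ in groupby(kept)]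
--     return kept
-- ===== Notes on version B (the rewrite author's own statement) =====
-- stated objective: idiomatic
-- what changed: Replaces the single fused loop with stateful prev/out accumulators by a three-pass pipeline: a comprehension filtering silence/empty tokens, an optional map through _TIMIT39_MAP, and itertools.groupby for adjacent-repeat collapsing.
import Mathlib
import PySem

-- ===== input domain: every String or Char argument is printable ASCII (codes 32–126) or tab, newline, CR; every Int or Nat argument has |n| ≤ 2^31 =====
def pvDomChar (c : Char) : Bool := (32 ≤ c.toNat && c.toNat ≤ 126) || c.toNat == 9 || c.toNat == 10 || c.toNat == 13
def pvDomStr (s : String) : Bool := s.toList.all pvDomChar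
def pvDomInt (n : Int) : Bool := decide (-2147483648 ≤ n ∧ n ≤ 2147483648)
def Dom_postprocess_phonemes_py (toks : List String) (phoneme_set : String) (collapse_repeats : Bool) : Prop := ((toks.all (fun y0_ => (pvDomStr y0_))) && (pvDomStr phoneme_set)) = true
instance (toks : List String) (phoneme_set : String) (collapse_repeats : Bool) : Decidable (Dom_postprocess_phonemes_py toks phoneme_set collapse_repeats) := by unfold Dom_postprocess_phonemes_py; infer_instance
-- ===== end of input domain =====

-- B replaces A's fused loop (out/prev accumulators) by a three-pass pipeline:
-- filter silence/empty tokens, optionally map through the TIMIT-39 table,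
-- then collapse adjacent repeats; same values, more idiomatic decomposition.


-- ===== PORT A =====
-- _TIMIT39_MAP as a PySem.Dict (insertion order)
def pvTimit39Map : PySem.Dict String String :=
  PySem.Dict.ofList
    [("ax","ah"), ("ix","ih"), ("ax-h","ah"), ("axr","er"),
     ("em","m"), ("en","n"), ("eng","ng"), ("el","l"),
     ("ux","uw"), ("dx","dx")]

-- _SILENCE_TOKENS as a PySem.Set
def pvSilenceTokens : PySem.Set String :=
  PySem.Set.ofList ["sil", "sp", "spn", "nsn", "pau"]

-- A's loop body over the state (out, prev), one step per token
def pvStepA (phoneme_set : String) (collapse_repeats : Bool)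
    (st : List String × Option String) (t : String) : List String × Option String :=
  if t ∈ pvSilenceTokens ∨ t = "" then st
  else
    let t' := if phoneme_set = "timit-39" then pvTimit39Map.getD t t else t
    if t' = "" then st
    else if collapse_repeats = true ∧ st.2.isSome ∧ some t' = st.2 then st
    else (st.1 ++ [t'], some t')

def postprocess_phonemes_py (toks : List String) (phoneme_set : String) (collapse_repeats : Bool) : List String :=
  (toks.foldl (pvStepA phoneme_set collapse_repeats) ([], none)).1

-- ===== PORT B =====
-- [k for k, _ in groupby(kept)]: keys of adjacent groups = adjacent dedup
def pvGroupKeys : List String → List String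
  | [] => []
  | [a] => [a]
  | a :: b :: rest => if a = b then pvGroupKeys (b :: rest) else a :: pvGroupKeys (b :: rest)

def postprocess_phonemes_py_alt (toks : List String) (phoneme_set : String) (collapse_repeats : Bool) : List String :=
  let kept := toks.filter (fun t => !(t = "") && !(t ∈ pvSilenceTokens : Bool))
  let kept := if phoneme_set = "timit-39" then kept.map (fun t => pvTimit39Map.getD t t) else kept
  if collapse_repeats then pvGroupKeys kept else kept

-- ===== PRECONDITION & SPEC =====
def Spec_postprocess_phonemes_py (toks : List String) (phoneme_set : String) (collapse_repeats : Bool) (out : List String) : Prop := out = postprocess_phonemes_py_alt toks phoneme_set collapse_repeats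
instance (toks : List String) (phoneme_set : String) (collapse_repeats : Bool) (out : List String) : Decidable (Spec_postprocess_phonemes_py toks phoneme_set collapse_repeats out) := by unfold Spec_postprocess_phonemes_py; infer_instance

-- ===== CLAIM (what is proved, stated in full; the proofs are below) =====
def Claim_equal_postprocess_phonemes_py : Prop := ∀ (toks : List String) (phoneme_set : String) (collapse_repeats : Bool), Dom_postprocess_phonemes_py toks phoneme_set collapse_repeats → Spec_postprocess_phonemes_py toks phoneme_set collapse_repeats (postprocess_phonemes_py toks phoneme_set collapse_repeats)

-- ===== LEMMAS AND PROOFS =====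

-- Tail-recursive characterisation of A's loop from a given prev
def pvGoA (phoneme_set : String) (collapse_repeats : Bool) : Option String → List String → List String
  | _, [] => []
  | prev, t :: ts =>
    if t ∈ pvSilenceTokens ∨ t = "" then pvGoA phoneme_set collapse_repeats prev ts
    else
      let t' := if phoneme_set = "timit-39" then pvTimit39Map.getD t t else t
      if t' = "" then pvGoA phoneme_set collapse_repeats prev ts
      else if collapse_repeats = true ∧ prev.isSome ∧ some t' = prev then pvGoA phoneme_set collapse_repeats prev ts
      else t' :: pvGoA phoneme_set collapse_repeats (some t') ts

lemma pvFoldA_eq (ps : String) (cr : Bool) (ts : List String) :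
    ∀ (out : List String) (prev : Option String),
      (ts.foldl (pvStepA ps cr) (out, prev)).1 = out ++ pvGoA ps cr prev ts := by
  induction ts with
  | nil => intro out prev; simp [pvGoA]
  | cons t ts ih =>
    intro out prev
    simp only [List.foldl_cons, pvStepA, pvGoA]
    split_ifs with h1 h2 h3 <;> simp [ih, List.append_assoc]

-- mapped tokens are never empty when the input token is non-empty
lemma pvMap_ne_empty (t : String) (ht : t ≠ "") : pvTimit39Map.getD t t ≠ "" := by
  rw [PySem.Dict.getD_eq_get?_getD]
  cases hq : pvTimit39Map.get? t with
  | none => simpa using ht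
  | some v =>
    have hm := PySem.Dict.mem_items_of_get?_eq_some (d := pvTimit39Map) (k := t) (v := v) hq
    have hit : pvTimit39Map.items =
        [("ax","ah"), ("ix","ih"), ("ax-h","ah"), ("axr","er"),
         ("em","m"), ("en","n"), ("eng","ng"), ("el","l"),
         ("ux","uw"), ("dx","dx")] := by decide
    rw [hit] at hm
    simp only [List.mem_cons, List.not_mem_nil, or_false, Prod.mk.injEq] at hm
    rcases hm with h|h|h|h|h|h|h|h|h|h <;> simp [h.2]

-- repeat-collapsing from a given prev, over the already filtered+mapped list
def pvCollapse (cr : Bool) : Option String → List String → List String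
  | _, [] => []
  | prev, t :: ts =>
    if cr = true ∧ prev.isSome ∧ some t = prev then pvCollapse cr prev ts
    else t :: pvCollapse cr (some t) ts

lemma pvGoA_eq_collapse (ps : String) (cr : Bool) (ts : List String) :
    ∀ (prev : Option String),
      pvGoA ps cr prev ts =
        pvCollapse cr prev
          ((ts.filter (fun t => !(t = "") && !(t ∈ pvSilenceTokens : Bool))).map
            (fun t => if ps = "timit-39" then pvTimit39Map.getD t t else t)) := by
  induction ts with
  | nil => intro prev; simp [pvGoA, pvCollapse]
  | cons t ts ih =>
    intro prev
    by_cases hsk : t ∈ pvSilenceTokens ∨ t = ""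
    · have hf : (!(t = "") && !(t ∈ pvSilenceTokens : Bool)) = false := by
        rcases hsk with h | h <;> simp [h]
      simp [pvGoA, hsk, hf, ih]
    · rw [not_or] at hsk
      have hf : (!(t = "") && !(t ∈ pvSilenceTokens : Bool)) = true := by
        simp [hsk.1, hsk.2]
      have ht' : (if ps = "timit-39" then pvTimit39Map.getD t t else t) ≠ "" := by
        split_ifs with h
        · exact pvMap_ne_empty t hsk.2
        · exact hsk.2
      have hfil : List.filter (fun t => !decide (t = "") && !decide (t ∈ pvSilenceTokens)) (t :: ts)
          = t :: List.filter (fun t => !decide (t = "") && !decide (t ∈ pvSilenceTokens)) ts := by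
        simp [hf]
      rw [hfil, List.map_cons]
      simp only [pvGoA, pvCollapse]
      rw [if_neg (by tauto), if_neg ht']
      split_ifs with h h2 h2 <;> simp_all

lemma pvCollapse_false (l : List String) : ∀ prev, pvCollapse false prev l = l := by
  induction l with
  | nil => intro prev; simp [pvCollapse]
  | cons t ts ih => intro prev; simp [pvCollapse, ih]

lemma pvCollapse_some (l : List String) :
    ∀ a, a :: pvCollapse true (some a) l = pvGroupKeys (a :: l) := by
  induction l with
  | nil => intro a; simp [pvCollapse, pvGroupKeys]
  | cons t ts ih =>
    intro a
    by_cases h : t = a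
    · subst h; simp [pvCollapse, pvGroupKeys, ih]
    · simp only [pvCollapse, pvGroupKeys]
      rw [if_neg (by simp [h]), if_neg (by exact fun hh => h hh.symm), ← ih]

lemma pvCollapse_none (l : List String) : pvCollapse true none l = pvGroupKeys l := by
  cases l with
  | nil => simp [pvCollapse, pvGroupKeys]
  | cons a ts => simp only [pvCollapse, Option.isSome_none]; rw [if_neg (by simp)]; exact pvCollapse_some ts a

-- ===== VERDICT (by name: the statement is the Claim_ definition above) =====
theorem postprocess_phonemes_py_spec : Claim_equal_postprocess_phonemes_py := by
  intro toks ps cr _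
  unfold Spec_postprocess_phonemes_py postprocess_phonemes_py postprocess_phonemes_py_alt
  rw [pvFoldA_eq, List.nil_append, pvGoA_eq_collapse]
  cases cr with
  | false =>
    simp only [Bool.false_eq_true, if_false, pvCollapse_false]
    split_ifs <;> simp
  | true =>
    simp only [if_true, pvCollapse_none]
    split_ifs <;> simp
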